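-- pv_equiv track=rewrite | github.com/Shinyanogit/procon | unsolved/100問/question17/trash.py | change_position
-- ===== SOURCE A (Python) =====
-- def change_position(r, c, placable):
--     if placable[r][c]:
--         tmp = [(r, c)]
--         for i in range(1, 8):
--             tmp.extend([(r - i, c - i), (r - i, c + i), (r + i, c - i), (r + i, c + i)])
--         for rx, cy in tmp:
--             if 0 <= rx < 8 and 0 <= cy < 8:
--                 placable[rx][cy] = 0
--         return (True, placable)
--     else:
--         return (False, placable)
-- ===== SOURCE B (Python) =====
-- def change_position(r, c, placable):
--     if placable[r][c]:
--         placable[r][c] = 0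
--         for dr, dc in ((-1, -1), (-1, 1), (1, -1), (1, 1)):
--             nr, nc = r + dr, c + dc
--             while 0 <= nr < 8 and 0 <= nc < 8:
--                 placable[nr][nc] = 0
--                 nr += dr
--                 nc += dc
--         return (True, placable)
--     else:
--         return (False, placable)
-- ===== Notes on version B (the rewrite author's own statement) =====
-- stated objective: alternative
-- what changed: A generates all 29 candidate diagonal offsets up to distance 7 and filters each against the 8x8 bounds; B clears the cell and walks the four diagonal directions with early-terminating in-board scans, never visiting an off-board position.
import Mathlib
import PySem

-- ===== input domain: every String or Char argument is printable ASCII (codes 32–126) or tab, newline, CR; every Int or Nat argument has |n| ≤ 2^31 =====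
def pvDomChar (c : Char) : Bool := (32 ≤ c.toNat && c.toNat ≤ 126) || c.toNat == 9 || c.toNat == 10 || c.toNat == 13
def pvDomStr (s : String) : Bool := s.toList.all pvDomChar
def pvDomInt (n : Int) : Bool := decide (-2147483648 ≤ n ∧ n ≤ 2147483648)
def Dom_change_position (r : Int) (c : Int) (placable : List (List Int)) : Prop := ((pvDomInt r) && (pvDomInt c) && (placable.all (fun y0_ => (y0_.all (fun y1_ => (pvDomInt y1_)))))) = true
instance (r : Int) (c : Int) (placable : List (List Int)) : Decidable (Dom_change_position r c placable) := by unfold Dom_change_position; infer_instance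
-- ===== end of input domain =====

-- B replaces A's generate-29-offsets-then-filter marking with four early-terminating
-- directional scans over the board (alternative decomposition, same cost class).
-- Both Pythons mutate `placable` in place and return it; the equivalence proved here is
-- about the RETURN value (the Lean ports are pure).

-- `board[rx][cy] = 0` as both Pythons perform it (read the row, set the entry, write the
-- row back); Python index semantics via pySetD/pyGetD (IndexError inputs excluded by Pre_).
def pvSetCell (b : List (List Int)) (rx cy : Int) : List (List Int) :=
  PySem.List.pySetD b rx (PySem.List.pySetD (PySem.List.pyGetD b rx []) cy 0)

-- ===== PORT A =====
def change_position (r : Int) (c : Int) (placable : List (List Int)) : Bool × List (List Int) :=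
  if PySem.List.pyGetD (PySem.List.pyGetD placable r []) c 0 ≠ 0 then
    let tmp : List (Int × Int) :=
      (PySem.List.pyRange 1 8 1).foldl
        (fun t i => t ++ [(r - i, c - i), (r - i, c + i), (r + i, c - i), (r + i, c + i)])
        [(r, c)]
    let b :=
      tmp.foldl
        (fun b p =>
          if 0 ≤ p.1 ∧ p.1 < 8 ∧ 0 ≤ p.2 ∧ p.2 < 8 then pvSetCell b p.1 p.2 else b)
        placable
    (true, b)
  else
    (false, placable)

-- ===== PORT B =====
-- the `while 0 <= nr < 8 and 0 <= nc < 8` loop; fuel 8 suffices: each step moves nr by dr = ±1,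
-- so a scan starting in [0,8) leaves the board after at most 8 steps
def pvWalk (dr dc : Int) : Nat → Int → Int → List (List Int) → List (List Int)
  | 0, _, _, b => b
  | f + 1, nr, nc, b =>
    if 0 ≤ nr ∧ nr < 8 ∧ 0 ≤ nc ∧ nc < 8 then
      pvWalk dr dc f (nr + dr) (nc + dc) (pvSetCell b nr nc)
    else b

def change_position_alt (r : Int) (c : Int) (placable : List (List Int)) : Bool × List (List Int) :=
  if PySem.List.pyGetD (PySem.List.pyGetD placable r []) c 0 ≠ 0 then
    let b0 := pvSetCell placable r c
    let b :=
      [((-1 : Int), (-1 : Int)), (-1, 1), (1, -1), (1, 1)].foldl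
        (fun b d => pvWalk d.1 d.2 8 (r + d.1) (c + d.2) b) b0
    (true, b)
  else
    (false, placable)

-- ===== PRECONDITION & SPEC =====
-- Pre_ excludes (a) inputs where Python A raises IndexError: an invalid initial index, or a
-- non-empty cell whose in-board diagonal reaches a row/column the ragged board does not have;
-- and (b) non-empty cells addressed through out-of-[0,8) coordinates (negative-index
-- wraparound / phantom off-board cells), where A's mark set is an artefact of its offset
-- filter: it zeroes diagonals of the phantom coordinate without clearing the cell it tested.
def Pre_change_position (r : Int) (c : Int) (placable : List (List Int)) : Prop :=
  PySem.Raise.InRange placable.length r ∧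
  PySem.Raise.InRange (PySem.List.pyGetD placable r []).length c ∧
  (PySem.List.pyGetD (PySem.List.pyGetD placable r []) c 0 ≠ 0 →
    0 ≤ r ∧ r < 8 ∧ 0 ≤ c ∧ c < 8 ∧
    ∀ x : Nat, x < 8 → ∀ y : Nat, y < 8 →
      ((x : Int) - r).natAbs = ((y : Int) - c).natAbs →
      x < placable.length ∧ y < (placable.getD x []).length)
instance (r : Int) (c : Int) (placable : List (List Int)) : Decidable (Pre_change_position r c placable) := by
  unfold Pre_change_position; infer_instance

def pvWitness_change_position : Int × Int × List (List Int) :=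
  (0, 0, [[1, 1, 1, 1, 1, 1, 1, 1], [1, 1, 1, 1, 1, 1, 1, 1], [1, 1, 1, 1, 1, 1, 1, 1],
          [1, 1, 1, 1, 1, 1, 1, 1], [1, 1, 1, 1, 1, 1, 1, 1], [1, 1, 1, 1, 1, 1, 1, 1],
          [1, 1, 1, 1, 1, 1, 1, 1], [1, 1, 1, 1, 1, 1, 1, 1]])

def Spec_change_position (r : Int) (c : Int) (placable : List (List Int)) (out : Bool × List (List Int)) : Prop := out = change_position_alt r c placable
instance (r : Int) (c : Int) (placable : List (List Int)) (out : Bool × List (List Int)) : Decidable (Spec_change_position r c placable out) := by unfold Spec_change_position; infer_instance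

-- ===== CLAIM (what is proved, stated in full; the proofs are below) =====
def Claim_equal_change_position : Prop := ∀ (r : Int) (c : Int) (placable : List (List Int)), Dom_change_position r c placable → Pre_change_position r c placable → Spec_change_position r c placable (change_position r c placable)

-- ===== LEMMAS AND PROOFS =====

-- entry read of the board, with Python's defaults (0 beyond a row, [] beyond the board)
def pvGet2 (b : List (List Int)) (z w : Nat) : Int := (b.getD z []).getD w 0

-- pvSetCell at nonnegative indices, in Nat form
def pvMark (b : List (List Int)) (x y : Nat) : List (List Int) :=
  b.set x ((b.getD x []).set y 0)

theorem pvGetD_set_self {α : Type} (l : List α) (i : Nat) (a d : α) (h : i < l.length) :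
    (l.set i a).getD i d = a := by
  rw [List.getD_eq_getElem?_getD, List.getElem?_set_self h]; rfl

theorem pvGetD_set_ne {α : Type} (l : List α) (i j : Nat) (a d : α) (h : i ≠ j) :
    (l.set i a).getD j d = l.getD j d := by
  rw [List.getD_eq_getElem?_getD, List.getElem?_set_ne h, ← List.getD_eq_getElem?_getD]

theorem pvGetD_of_le {α : Type} (l : List α) (i : Nat) (d : α) (h : l.length ≤ i) :
    l.getD i d = d := by
  rw [List.getD_eq_getElem?_getD, List.getElem?_eq_none h]; rfl

theorem pvSetCell_eq_pvMark (b : List (List Int)) (rx cy : Int) (hx : 0 ≤ rx) (hy : 0 ≤ cy) :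
    pvSetCell b rx cy = pvMark b rx.toNat cy.toNat := by
  unfold pvSetCell pvMark
  conv_lhs => rw [← Int.toNat_of_nonneg hx, ← Int.toNat_of_nonneg hy]
  simp only [PySem.List.pySetD_natCast, PySem.List.pyGetD_natCast]

theorem pvMark_length (b : List (List Int)) (x y : Nat) : (pvMark b x y).length = b.length := by
  simp [pvMark]

theorem pvMark_rowlen (b : List (List Int)) (x y z : Nat) :
    ((pvMark b x y).getD z []).length = (b.getD z []).length := by
  unfold pvMark
  rcases Nat.lt_or_ge x b.length with h | h
  · by_cases hz : z = x
    · subst hz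
      rw [pvGetD_set_self _ _ _ _ h, List.length_set]
    · rw [pvGetD_set_ne _ _ _ _ _ (by omega : x ≠ z)]
  · rw [List.set_eq_of_length_le h]

theorem pvGet2_pvMark (b : List (List Int)) (x y z w : Nat) :
    pvGet2 (pvMark b x y) z w = if z = x ∧ w = y then 0 else pvGet2 b z w := by
  unfold pvGet2 pvMark
  rcases Nat.lt_or_ge x b.length with h | h
  · by_cases hz : z = x
    · subst hz
      rw [pvGetD_set_self _ _ _ _ h]
      by_cases hw : w = y
      · subst hw
        rw [if_pos ⟨rfl, rfl⟩]
        rcases Nat.lt_or_ge w (b.getD z []).length with h2 | h2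
        · rw [pvGetD_set_self _ _ _ _ h2]
        · rw [List.set_eq_of_length_le h2, pvGetD_of_le _ _ _ h2]
      · rw [if_neg (by tauto), pvGetD_set_ne _ _ _ _ _ (by omega : y ≠ w)]
    · rw [pvGetD_set_ne _ _ _ _ _ (by omega : x ≠ z), if_neg (by tauto)]
  · rw [List.set_eq_of_length_le h]
    by_cases hz : z = x
    · subst hz
      have he : b.getD z [] = [] := pvGetD_of_le _ _ _ h
      rw [he]
      by_cases hw : w = y <;> simp [hw]
    · rw [if_neg (by tauto)]

-- characterisation of A's marking fold
theorem foldA_pvGet2 (L : List (Int × Int)) (b : List (List Int)) (z w : Nat) :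
    pvGet2 (L.foldl
      (fun b p => if 0 ≤ p.1 ∧ p.1 < 8 ∧ 0 ≤ p.2 ∧ p.2 < 8 then pvSetCell b p.1 p.2 else b) b) z w
    = if (((z : Int), (w : Int)) ∈ L ∧ z < 8 ∧ w < 8) then 0 else pvGet2 b z w := by
  induction L generalizing b with
  | nil => simp
  | cons p t ih =>
    rcases p with ⟨p1, p2⟩
    rw [List.foldl_cons, ih]
    by_cases hm : ((z : Int), (w : Int)) ∈ t ∧ z < 8 ∧ w < 8
    · rw [if_pos hm, if_pos ⟨List.mem_cons_of_mem _ hm.1, hm.2⟩]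
    · rw [if_neg hm]
      by_cases hg : 0 ≤ p1 ∧ p1 < 8 ∧ 0 ≤ p2 ∧ p2 < 8
      · rw [if_pos hg, pvSetCell_eq_pvMark b p1 p2 hg.1 hg.2.2.1, pvGet2_pvMark]
        by_cases hp : z = p1.toNat ∧ w = p2.toNat
        · rw [if_pos hp,
            if_pos ⟨List.mem_cons.mpr (Or.inl (by simp only [Prod.mk.injEq]; omega)),
              by omega, by omega⟩]
        · rw [if_neg hp, if_neg]
          rintro ⟨hmem, hz8, hw8⟩
          rcases List.mem_cons.mp hmem with he | ht
          · have h1 := congrArg Prod.fst he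
            have h2 := congrArg Prod.snd he
            simp only at h1 h2
            exact hp ⟨by omega, by omega⟩
          · exact hm ⟨ht, hz8, hw8⟩
      · rw [if_neg hg, if_neg]
        rintro ⟨hmem, hz8, hw8⟩
        rcases List.mem_cons.mp hmem with he | ht
        · have h1 := congrArg Prod.fst he
          have h2 := congrArg Prod.snd he
          simp only at h1 h2
          exact hg ⟨by omega, by omega, by omega, by omega⟩
        · exact hm ⟨ht, hz8, hw8⟩

theorem foldA_length (L : List (Int × Int)) (b : List (List Int)) :
    (L.foldl
      (fun b p => if 0 ≤ p.1 ∧ p.1 < 8 ∧ 0 ≤ p.2 ∧ p.2 < 8 then pvSetCell b p.1 p.2 else b) b).length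
    = b.length := by
  induction L generalizing b with
  | nil => rfl
  | cons p t ih =>
    rw [List.foldl_cons, ih]
    by_cases hg : 0 ≤ p.1 ∧ p.1 < 8 ∧ 0 ≤ p.2 ∧ p.2 < 8
    · rw [if_pos hg, pvSetCell_eq_pvMark b p.1 p.2 hg.1 hg.2.2.1, pvMark_length]
    · rw [if_neg hg]

theorem foldA_rowlen (L : List (Int × Int)) (b : List (List Int)) (z : Nat) :
    ((L.foldl
      (fun b p => if 0 ≤ p.1 ∧ p.1 < 8 ∧ 0 ≤ p.2 ∧ p.2 < 8 then pvSetCell b p.1 p.2 else b) b).getD z []).length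
    = (b.getD z []).length := by
  induction L generalizing b with
  | nil => rfl
  | cons p t ih =>
    rw [List.foldl_cons, ih]
    by_cases hg : 0 ≤ p.1 ∧ p.1 < 8 ∧ 0 ≤ p.2 ∧ p.2 < 8
    · rw [if_pos hg, pvSetCell_eq_pvMark b p.1 p.2 hg.1 hg.2.2.1, pvMark_rowlen]
    · rw [if_neg hg]

-- characterisation of one directional scan of B
theorem pvWalk_pvGet2 (dr dc : Int) (f : Nat) (nr nc : Int) (b : List (List Int)) (z w : Nat) :
    pvGet2 (pvWalk dr dc f nr nc b) z w
    = if (∃ k : Nat, k < f ∧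
            (∀ j : Nat, j ≤ k → 0 ≤ nr + j * dr ∧ nr + j * dr < 8 ∧ 0 ≤ nc + j * dc ∧ nc + j * dc < 8) ∧
            (z : Int) = nr + k * dr ∧ (w : Int) = nc + k * dc)
      then 0 else pvGet2 b z w := by
  induction f generalizing nr nc b with
  | zero => simp [pvWalk]
  | succ f ih =>
    rw [pvWalk]
    by_cases hg : 0 ≤ nr ∧ nr < 8 ∧ 0 ≤ nc ∧ nc < 8
    · rw [if_pos hg, ih, pvSetCell_eq_pvMark b nr nc hg.1 hg.2.2.1, pvGet2_pvMark]
      by_cases hEx : ∃ k : Nat, k < f ∧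
          (∀ j : Nat, j ≤ k → 0 ≤ (nr + dr) + j * dr ∧ (nr + dr) + j * dr < 8 ∧
            0 ≤ (nc + dc) + j * dc ∧ (nc + dc) + j * dc < 8) ∧
          (z : Int) = (nr + dr) + k * dr ∧ (w : Int) = (nc + dc) + k * dc
      · rw [if_pos hEx, if_pos]
        rcases hEx with ⟨k, hk, hpref, hz, hw⟩
        refine ⟨k + 1, by omega, ?_, ?_, ?_⟩
        · intro j hj
          rcases Nat.eq_zero_or_pos j with hj0 | hj0
          · subst hj0; simpa using hg
          · have := hpref (j - 1) (by omega)
            have e1 : nr + (j : Int) * dr = (nr + dr) + ((j - 1 : Nat) : Int) * dr := by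
              have : ((j - 1 : Nat) : Int) = (j : Int) - 1 := by omega
              rw [this]; ring
            have e2 : nc + (j : Int) * dc = (nc + dc) + ((j - 1 : Nat) : Int) * dc := by
              have : ((j - 1 : Nat) : Int) = (j : Int) - 1 := by omega
              rw [this]; ring
            rw [e1, e2]; exact this
        · rw [hz]; push_cast; ring
        · rw [hw]; push_cast; ring
      · rw [if_neg hEx]
        by_cases hp : z = nr.toNat ∧ w = nc.toNat
        · rw [if_pos hp, if_pos]
          refine ⟨0, by omega, ?_, by push_cast; omega, by push_cast; omega⟩
          intro j hj
          have : j = 0 := by omega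
          subst this
          simpa using hg
        · rw [if_neg hp, if_neg]
          rintro ⟨k, hk, hpref, hz, hw⟩
          rcases Nat.eq_zero_or_pos k with hk0 | hk0
          · subst hk0
            simp only [Nat.cast_zero, zero_mul, add_zero] at hz hw
            exact hp ⟨by omega, by omega⟩
          · apply hEx
            refine ⟨k - 1, by omega, ?_, ?_, ?_⟩
            · intro j hj
              have := hpref (j + 1) (by omega)
              have e1 : (nr + dr) + (j : Int) * dr = nr + ((j + 1 : Nat) : Int) * dr := by
                push_cast; ring
              have e2 : (nc + dc) + (j : Int) * dc = nc + ((j + 1 : Nat) : Int) * dc := by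
                push_cast; ring
              rw [e1, e2]; exact this
            · rw [hz]
              have : ((k - 1 : Nat) : Int) = (k : Int) - 1 := by omega
              rw [this]; ring
            · rw [hw]
              have : ((k - 1 : Nat) : Int) = (k : Int) - 1 := by omega
              rw [this]; ring
    · rw [if_neg hg, if_neg]
      rintro ⟨k, hk, hpref, hz, hw⟩
      have := hpref 0 (by omega)
      simp only [Nat.cast_zero, zero_mul, add_zero] at this
      exact hg this

theorem pvWalk_length (dr dc : Int) (f : Nat) (nr nc : Int) (b : List (List Int)) :
    (pvWalk dr dc f nr nc b).length = b.length := by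
  induction f generalizing nr nc b with
  | zero => rfl
  | succ f ih =>
    rw [pvWalk]
    by_cases hg : 0 ≤ nr ∧ nr < 8 ∧ 0 ≤ nc ∧ nc < 8
    · rw [if_pos hg, ih, pvSetCell_eq_pvMark b nr nc hg.1 hg.2.2.1, pvMark_length]
    · rw [if_neg hg]

theorem pvWalk_rowlen (dr dc : Int) (f : Nat) (nr nc : Int) (b : List (List Int)) (z : Nat) :
    ((pvWalk dr dc f nr nc b).getD z []).length = (b.getD z []).length := by
  induction f generalizing nr nc b with
  | zero => rfl
  | succ f ih =>
    rw [pvWalk]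
    by_cases hg : 0 ≤ nr ∧ nr < 8 ∧ 0 ≤ nc ∧ nc < 8
    · rw [if_pos hg, ih, pvSetCell_eq_pvMark b nr nc hg.1 hg.2.2.1, pvMark_rowlen]
    · rw [if_neg hg]

-- two boards with the same shape and the same entries are equal
theorem pvBoard_ext (b1 b2 : List (List Int)) (hL : b1.length = b2.length)
    (hR : ∀ z : Nat, (b1.getD z []).length = (b2.getD z []).length)
    (hE : ∀ z w : Nat, pvGet2 b1 z w = pvGet2 b2 z w) : b1 = b2 := by
  apply List.ext_getElem hL
  intro i h1 h2
  have hrl : b1[i].length = b2[i].length := by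
    have := hR i
    rwa [List.getD_eq_getElem _ _ h1, List.getD_eq_getElem _ _ h2] at this
  apply List.ext_getElem hrl
  intro j hj1 hj2
  have := hE i j
  unfold pvGet2 at this
  rwa [List.getD_eq_getElem _ _ h1, List.getD_eq_getElem _ _ h2,
       List.getD_eq_getElem _ _ hj1, List.getD_eq_getElem _ _ hj2] at this

-- A's candidate list, flattened
theorem tmp_mem (r c : Int) (p : Int × Int) :
    p ∈ (PySem.List.pyRange 1 8 1).foldl
          (fun t i => t ++ [(r - i, c - i), (r - i, c + i), (r + i, c - i), (r + i, c + i)])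
          [(r, c)]
    ↔ p = (r, c) ∨ ∃ i : Int, 1 ≤ i ∧ i < 8 ∧
        (p = (r - i, c - i) ∨ p = (r - i, c + i) ∨ p = (r + i, c - i) ∨ p = (r + i, c + i)) := by
  rw [PySem.List.foldl_append_eq_flatMap]
  simp only [List.mem_append, List.mem_flatMap,
    PySem.List.mem_pyRange_one, List.mem_cons, List.not_mem_nil, or_false]
  exact or_congr Iff.rfl (exists_congr fun i => by tauto)

-- the cells one directional scan of B zeroes (matches pvWalk_pvGet2 at fuel 8, start (r+dr, c+dc))
def ExD (r c dr dc : Int) (z w : Nat) : Prop :=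
  ∃ k : Nat, k < 8 ∧
    (∀ j : Nat, j ≤ k → 0 ≤ r + dr + j * dr ∧ r + dr + j * dr < 8 ∧
      0 ≤ c + dc + j * dc ∧ c + dc + j * dc < 8) ∧
    (z : Int) = r + dr + k * dr ∧ (w : Int) = c + dc + k * dc

-- merge a nested if with equal 'then' values
theorem pv_if_merge {A B : Prop} [Decidable A] [Decidable B] {x y : Int} :
    (if A then x else if B then x else y) = if A ∨ B then x else y := by
  split_ifs <;> tauto

-- the two mark conditions coincide for an in-board centre
theorem cond_iff (r c : Int) (hr : 0 ≤ r ∧ r < 8) (hc : 0 ≤ c ∧ c < 8) (z w : Nat) :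
    ((((z : Int), (w : Int)) ∈ (PySem.List.pyRange 1 8 1).foldl
        (fun t i => t ++ [(r - i, c - i), (r - i, c + i), (r + i, c - i), (r + i, c + i)])
        [(r, c)]) ∧ z < 8 ∧ w < 8)
    ↔ ((((ExD r c 1 1 z w ∨ ExD r c 1 (-1) z w) ∨ ExD r c (-1) 1 z w) ∨ ExD r c (-1) (-1) z w) ∨
        (z = r.toNat ∧ w = c.toNat)) := by
  rw [tmp_mem]
  constructor
  · rintro ⟨hmem, hz8, hw8⟩
    rcases hmem with hcen | ⟨i, h1, h8, hcase⟩
    · simp only [Prod.mk.injEq] at hcen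
      exact Or.inr ⟨by omega, by omega⟩
    · simp only [Prod.mk.injEq] at hcase
      rcases hcase with ⟨hz1, hz2⟩ | ⟨hz1, hz2⟩ | ⟨hz1, hz2⟩ | ⟨hz1, hz2⟩
      · -- p = (r - i, c - i): direction (-1, -1)
        refine Or.inl (Or.inr ⟨(i - 1).toNat, by omega, ?_, ?_, ?_⟩)
        · intro j hj
          simp only [mul_neg_one]
          omega
        · simp only [mul_neg_one]; omega
        · simp only [mul_neg_one]; omega
      · -- p = (r - i, c + i): direction (-1, 1)
        refine Or.inl (Or.inl (Or.inr ⟨(i - 1).toNat, by omega, ?_, ?_, ?_⟩))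
        · intro j hj
          simp only [mul_neg_one, mul_one]
          omega
        · simp only [mul_neg_one]; omega
        · simp only [mul_one]; omega
      · -- p = (r + i, c - i): direction (1, -1)
        refine Or.inl (Or.inl (Or.inl (Or.inr ⟨(i - 1).toNat, by omega, ?_, ?_, ?_⟩)))
        · intro j hj
          simp only [mul_neg_one, mul_one]
          omega
        · simp only [mul_one]; omega
        · simp only [mul_neg_one]; omega
      · -- p = (r + i, c + i): direction (1, 1)
        refine Or.inl (Or.inl (Or.inl (Or.inl ⟨(i - 1).toNat, by omega, ?_, ?_, ?_⟩)))
        · intro j hj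
          simp only [mul_one]
          omega
        · simp only [mul_one]; omega
        · simp only [mul_one]; omega
  · rintro ((((⟨k, hk, hpref, hz, hw⟩ | ⟨k, hk, hpref, hz, hw⟩) | ⟨k, hk, hpref, hz, hw⟩) |
      ⟨k, hk, hpref, hz, hw⟩) | ⟨hz, hw⟩)
    · -- direction (1, 1): p = (r + i, c + i)
      have hb := hpref k (le_refl k)
      simp only [mul_one] at hb hz hw
      refine ⟨Or.inr ⟨k + 1, by omega, by omega, Or.inr (Or.inr (Or.inr ?_))⟩, by omega, by omega⟩
      simp only [Prod.mk.injEq]; omega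
    · -- direction (1, -1): p = (r + i, c - i)
      have hb := hpref k (le_refl k)
      simp only [mul_neg_one, mul_one] at hb hz hw
      refine ⟨Or.inr ⟨k + 1, by omega, by omega, Or.inr (Or.inr (Or.inl ?_))⟩, by omega, by omega⟩
      simp only [Prod.mk.injEq]; omega
    · -- direction (-1, 1): p = (r - i, c + i)
      have hb := hpref k (le_refl k)
      simp only [mul_neg_one, mul_one] at hb hz hw
      refine ⟨Or.inr ⟨k + 1, by omega, by omega, Or.inr (Or.inl ?_)⟩, by omega, by omega⟩
      simp only [Prod.mk.injEq]; omega
    · -- direction (-1, -1): p = (r - i, c - i)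
      have hb := hpref k (le_refl k)
      simp only [mul_neg_one] at hb hz hw
      refine ⟨Or.inr ⟨k + 1, by omega, by omega, Or.inl ?_⟩, by omega, by omega⟩
      simp only [Prod.mk.injEq]; omega
    · -- the centre cell
      refine ⟨Or.inl ?_, by omega, by omega⟩
      simp only [Prod.mk.injEq]; omega

-- ===== VERDICT (by name: the statement is the Claim_ definition above) =====
set_option maxHeartbeats 1000000 in
theorem change_position_spec : Claim_equal_change_position := by
  unfold Claim_equal_change_position Spec_change_position
  intro r c placable _ hpre
  unfold change_position change_position_alt
  by_cases hv : PySem.List.pyGetD (PySem.List.pyGetD placable r []) c 0 ≠ 0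
  · rw [if_pos hv, if_pos hv]
    obtain ⟨-, -, hmain⟩ := hpre
    obtain ⟨hr0, hr8, hc0, hc8, -⟩ := hmain hv
    simp only [Prod.mk.injEq, true_and]
    have hB : [((-1 : Int), (-1 : Int)), (-1, 1), (1, -1), (1, 1)].foldl
        (fun b d => pvWalk d.1 d.2 8 (r + d.1) (c + d.2) b) (pvSetCell placable r c)
        = pvWalk 1 1 8 (r + 1) (c + 1) (pvWalk 1 (-1) 8 (r + 1) (c + -1)
            (pvWalk (-1) 1 8 (r + -1) (c + 1) (pvWalk (-1) (-1) 8 (r + -1) (c + -1)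
              (pvSetCell placable r c)))) := rfl
    rw [hB, pvSetCell_eq_pvMark placable r c hr0 hc0]
    apply pvBoard_ext
    · rw [foldA_length]
      simp only [pvWalk_length, pvMark_length]
    · intro z
      rw [foldA_rowlen]
      simp only [pvWalk_rowlen, pvMark_rowlen]
    · intro z w
      rw [foldA_pvGet2, pvWalk_pvGet2, pvWalk_pvGet2, pvWalk_pvGet2, pvWalk_pvGet2,
          pvGet2_pvMark, pv_if_merge, pv_if_merge, pv_if_merge, pv_if_merge]
      have hiff := cond_iff r c ⟨hr0, hr8⟩ ⟨hc0, hc8⟩ z w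
      simp only [ExD] at hiff
      exact if_congr hiff rfl rfl
  · rw [if_neg hv, if_neg hv]
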